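-- pv_equiv track=rewrite | github.com/ParraLuca/AlertMe | AlertMe/alertme_immokh.py | _min_int_id
-- ===== SOURCE A (Python) =====
-- from typing import Any, Dict, List, Optional, Tuple
--
-- def _min_int_id(items: List[Dict[str, Any]]) -> Optional[int]:
--     ints = []
--     for it in items:
--         try:
--             ints.append(int(it["id"]))
--         except Exception:
--             pass
--     return min(ints) if ints else None
-- ===== SOURCE B (Python) =====
-- from typing import Any, Dict, List, Optional, Tuple
--
-- def _min_int_id(items: List[Dict[str, Any]]) -> Optional[int]:
--     best = None
--     for it in items:
--         try:
--             val = int(it["id"])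
--         except Exception:
--             continue
--         if best is None or val < best:
--             best = val
--     return best
-- ===== Notes on version B (the rewrite author's own statement) =====
-- stated objective: simpler
-- what changed: B keeps a running minimum in a single pass with a None accumulator instead of first building a list of all converted ids and then reducing it with min().
import Mathlib
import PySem

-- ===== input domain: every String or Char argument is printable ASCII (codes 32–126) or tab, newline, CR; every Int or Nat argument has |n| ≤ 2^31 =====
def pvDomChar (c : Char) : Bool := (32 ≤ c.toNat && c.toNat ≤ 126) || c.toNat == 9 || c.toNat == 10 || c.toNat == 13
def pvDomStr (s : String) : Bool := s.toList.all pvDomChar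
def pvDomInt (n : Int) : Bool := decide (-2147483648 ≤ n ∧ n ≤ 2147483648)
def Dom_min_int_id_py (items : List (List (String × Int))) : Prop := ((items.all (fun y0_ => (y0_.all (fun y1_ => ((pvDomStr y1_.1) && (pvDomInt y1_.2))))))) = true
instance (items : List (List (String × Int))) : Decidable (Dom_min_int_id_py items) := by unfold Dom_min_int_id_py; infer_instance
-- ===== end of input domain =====

-- B computes the minimum "id" in a single pass with an Option accumulator instead of building a list and reducing it with min (objective: simpler).


-- ===== PORT A =====
-- Values in the dict are Ints, so int(it["id"]) succeeds whenever the key is present;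
-- the try/except only swallows the KeyError of a missing "id" key.
def min_int_id_py (items : List (List (String × Int))) : Option Int :=
  let ints := items.foldl (fun acc it =>
    match (PySem.Dict.mk it).get? "id" with
    | some v => acc ++ [v]
    | none => acc) []
  if ints ≠ [] then PySem.List.min? ints (fun x => x) else none

-- ===== PORT B =====
def min_int_id_py_alt (items : List (List (String × Int))) : Option Int :=
  items.foldl (fun best it =>
    match (PySem.Dict.mk it).get? "id" with
    | some v =>
        match best with
        | none => some v
        | some b => if v < b then some v else some b
    | none => best) none

-- ===== PRECONDITION & SPEC =====
def Spec_min_int_id_py (items : List (List (String × Int))) (out : Option Int) : Prop := out = min_int_id_py_alt items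
instance (items : List (List (String × Int))) (out : Option Int) : Decidable (Spec_min_int_id_py items out) := by unfold Spec_min_int_id_py; infer_instance

-- ===== CLAIM (what is proved, stated in full; the proofs are below) =====
def Claim_equal_min_int_id_py : Prop := ∀ (items : List (List (String × Int))), Dom_min_int_id_py items → Spec_min_int_id_py items (min_int_id_py items)

-- ===== LEMMAS AND PROOFS =====

-- ===== VERDICT (by name: the statement is the Claim_ definition above) =====
-- min over a list extended on the right, expressed as the accumulator update B performs
lemma min?_append_singleton (acc : List Int) (v : Int) :
    PySem.List.min? (acc ++ [v]) (fun x => x) =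
      some (match PySem.List.min? acc (fun x => x) with
            | none => v
            | some b => if v < b then v else b) := by
  cases acc with
  | nil => rfl
  | cons a t =>
      simp only [List.cons_append, PySem.List.min?_id_cons, List.foldl_append, List.foldl]
      congr 1
      simp only [min_def]
      split_ifs <;> omega

-- loop invariant: the minimum of A's accumulated list equals B's running accumulator
lemma fold_inv (items : List (List (String × Int))) :
    ∀ acc : List Int,
      PySem.List.min?
        (items.foldl (fun acc it =>
          match (PySem.Dict.mk it).get? "id" with
          | some v => acc ++ [v]
          | none => acc) acc) (fun x => x) =
      items.foldl (fun best it =>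
        match (PySem.Dict.mk it).get? "id" with
        | some v =>
            match best with
            | none => some v
            | some b => if v < b then some v else some b
        | none => best) (PySem.List.min? acc (fun x => x)) := by
  induction items with
  | nil => intro acc; rfl
  | cons it rest ih =>
      intro acc
      simp only [List.foldl]
      cases h : (PySem.Dict.mk it).get? "id" with
      | none => exact ih acc
      | some v =>
          rw [ih (acc ++ [v]), min?_append_singleton]
          cases hm : PySem.List.min? acc (fun x => x) with
          | none => rfl
          | some b => by_cases hv : v < b <;> simp [hv]

theorem min_int_id_py_spec : Claim_equal_min_int_id_py := by
  intro items _
  unfold Spec_min_int_id_py min_int_id_py min_int_id_py_alt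
  have h := fold_inv items []
  show (if _ ≠ ([] : List Int) then _ else none) = _
  split_ifs with hne
  · exact h
  · have hL := not_not.mp hne
    rw [hL] at h
    exact h
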